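-- pv_equiv track=rewrite | github.com/gxrdon/bwt_var | fmmap.py | occ
-- ===== SOURCE A (Python) =====
-- def occ(string):
--     occ_arr = [[0 for i in range(4)] for j in range(len(string))]
--     for i in range(0, len(string)):
--         if string[i] == 'A':
--             if i == 0:
--                 occ_arr[i][0] = 1
--             else:
--                 occ_arr[i][0] = occ_arr[i - 1][0] + 1
--                 occ_arr[i][1] = occ_arr[i - 1][1]
--                 occ_arr[i][2] = occ_arr[i - 1][2]
--                 occ_arr[i][3] = occ_arr[i - 1][3]
--         elif string[i] == 'C':
--             if i == 0:
--                 occ_arr[i][1] = 1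
--             else:
--                 occ_arr[i][1] = occ_arr[i - 1][1] + 1
--                 occ_arr[i][0] = occ_arr[i - 1][0]
--                 occ_arr[i][2] = occ_arr[i - 1][2]
--                 occ_arr[i][3] = occ_arr[i - 1][3]
--         elif string[i] == 'G':
--             if i == 0:
--                 occ_arr[i][2] = 1
--             else:
--                 occ_arr[i][2] = occ_arr[i - 1][2] + 1
--                 occ_arr[i][1] = occ_arr[i - 1][1]
--                 occ_arr[i][0] = occ_arr[i - 1][0]
--                 occ_arr[i][3] = occ_arr[i - 1][3]
--         elif string[i] == 'T':
--             if i == 0: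
--                 occ_arr[i][3] = 1
--             else:
--                 occ_arr[i][3] = occ_arr[i - 1][3] + 1
--                 occ_arr[i][1] = occ_arr[i - 1][1]
--                 occ_arr[i][2] = occ_arr[i - 1][2]
--                 occ_arr[i][0] = occ_arr[i - 1][0]
--         else:
--             occ_arr[i][1] = occ_arr[i - 1][1]
--             occ_arr[i][2] = occ_arr[i - 1][2]
--             occ_arr[i][0] = occ_arr[i - 1][0]
--             occ_arr[i][3] = occ_arr[i - 1][3]
--     return occ_arr
-- ===== SOURCE B (Python) =====
-- from itertools import accumulate
--
-- def occ(string):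
--     cols = [list(accumulate((1 if ch == sym else 0) for ch in string))
--             for sym in 'ACGT']
--     return [list(row) for row in zip(*cols)]
-- ===== Notes on version B (the rewrite author's own statement) =====
-- stated objective: simpler
-- what changed: Replaces the interleaved row-by-row pass (copying the previous row and bumping one of four columns, with a special i==0 case) by four independent per-symbol prefix sums via itertools.accumulate, zipped into rows; the C-level accumulate/zip give a constant-factor speedup.
import Mathlib
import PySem

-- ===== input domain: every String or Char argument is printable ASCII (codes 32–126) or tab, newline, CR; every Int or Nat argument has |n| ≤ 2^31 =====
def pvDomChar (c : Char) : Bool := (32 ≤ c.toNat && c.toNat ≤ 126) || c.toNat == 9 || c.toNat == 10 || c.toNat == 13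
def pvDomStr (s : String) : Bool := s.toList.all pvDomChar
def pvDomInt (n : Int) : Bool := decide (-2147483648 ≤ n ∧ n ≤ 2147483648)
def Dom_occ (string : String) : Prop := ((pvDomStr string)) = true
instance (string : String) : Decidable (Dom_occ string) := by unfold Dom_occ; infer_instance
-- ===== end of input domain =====

-- B replaces A's interleaved row-by-row pass with four per-symbol prefix-sum columns zipped into rows; objective: simpler.

-- ===== PORT A =====
-- A builds the table forward: each iteration reads the previous row (all zeros before
-- any row is written, which also covers the i==0 else-branch reading occ_arr[-1])
-- and writes row i according to the five-way branch on string[i].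
def occ_go : List Char → Nat → Int → Int → Int → Int → List (List Int)
  | [], _, _, _, _, _ => []
  | ch :: rest, i, p0, p1, p2, p3 =>
    if ch = 'A' then
      if i = 0 then
        [1, 0, 0, 0] :: occ_go rest (i + 1) 1 0 0 0
      else
        [p0 + 1, p1, p2, p3] :: occ_go rest (i + 1) (p0 + 1) p1 p2 p3
    else if ch = 'C' then
      if i = 0 then
        [0, 1, 0, 0] :: occ_go rest (i + 1) 0 1 0 0
      else
        [p0, p1 + 1, p2, p3] :: occ_go rest (i + 1) p0 (p1 + 1) p2 p3
    else if ch = 'G' then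
      if i = 0 then
        [0, 0, 1, 0] :: occ_go rest (i + 1) 0 0 1 0
      else
        [p0, p1, p2 + 1, p3] :: occ_go rest (i + 1) p0 p1 (p2 + 1) p3
    else if ch = 'T' then
      if i = 0 then
        [0, 0, 0, 1] :: occ_go rest (i + 1) 0 0 0 1
      else
        [p0, p1, p2, p3 + 1] :: occ_go rest (i + 1) p0 p1 p2 (p3 + 1)
    else
      [p0, p1, p2, p3] :: occ_go rest (i + 1) p0 p1 p2 p3

def occ (string : String) : List (List Int) := occ_go string.toList 0 0 0 0 0

-- ===== PORT B =====
-- accCol c l acc = running prefix sums of the 0/1 indicator (· = c), itertools.accumulate style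
def accCol (c : Char) : List Char → Int → List Int
  | [], _ => []
  | x :: xs, acc =>
    let a := acc + (if x = c then 1 else 0)
    a :: accCol c xs a

-- zip of the four columns into rows (stops at the shortest, like Python's zip)
def zip4 : List Int → List Int → List Int → List Int → List (List Int)
  | a :: as, b :: bs, c :: cs, d :: ds => [a, b, c, d] :: zip4 as bs cs ds
  | _, _, _, _ => []

def occ_alt (string : String) : List (List Int) :=
  zip4 (accCol 'A' string.toList 0) (accCol 'C' string.toList 0)
       (accCol 'G' string.toList 0) (accCol 'T' string.toList 0)

-- ===== PRECONDITION & SPEC =====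
def Spec_occ (string : String) (out : List (List Int)) : Prop := out = occ_alt string
instance (string : String) (out : List (List Int)) : Decidable (Spec_occ string out) := by unfold Spec_occ; infer_instance

-- ===== CLAIM (what is proved, stated in full; the proofs are below) =====
def Claim_equal_occ : Prop := ∀ (string : String), Dom_occ string → Spec_occ string (occ string)

-- ===== LEMMAS AND PROOFS =====
theorem occ_go_eq_zip (l : List Char) (i : Nat) (p0 p1 p2 p3 : Int)
    (h : i = 0 → p0 = 0 ∧ p1 = 0 ∧ p2 = 0 ∧ p3 = 0) :
    occ_go l i p0 p1 p2 p3 =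
      zip4 (accCol 'A' l p0) (accCol 'C' l p1) (accCol 'G' l p2) (accCol 'T' l p3) := by
  induction l generalizing i p0 p1 p2 p3 with
  | nil => simp [occ_go, accCol, zip4]
  | cons ch rest ih =>
    by_cases hA : ch = 'A' <;> by_cases hC : ch = 'C' <;> by_cases hG : ch = 'G' <;>
      by_cases hT : ch = 'T' <;>
      rcases Nat.eq_zero_or_pos i with hi | hi <;>
      first
        | (obtain ⟨e0, e1, e2, e3⟩ := h hi
           subst hi e0 e1 e2 e3
           simp [occ_go, accCol, zip4, hA, hC, hG, hT]
           all_goals exact ih _ _ _ _ _ (by omega))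
        | (simp [occ_go, accCol, zip4, hA, hC, hG, hT, Nat.pos_iff_ne_zero.mp hi]
           all_goals exact ih _ _ _ _ _ (by omega))

-- ===== VERDICT (by name: the statement is the Claim_ definition above) =====
theorem occ_spec : Claim_equal_occ := by
  intro s _
  unfold Spec_occ occ occ_alt
  exact occ_go_eq_zip _ 0 0 0 0 0 (by simp)
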